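-- pv_equiv track=rewrite | github.com/jeshin119/fastapi-safe-slack | app/core/utils.py | sanitize_email
-- ===== SOURCE A (Python) =====
-- def sanitize_email(email: str) -> str:
--     """
--     이메일 주소를 Sanitize합니다.
--     """
--     if not email:
--         return email
--
--     # 이메일 형식 검증 및 정리
--     email = email.lower().strip()
--
--     # 위험한 문자 제거
--     dangerous_chars = ['<', '>', '"', "'", '&']
--     for char in dangerous_chars:
--         email = email.replace(char, '')
--
--     return email
-- ===== SOURCE B (Python) =====
-- def sanitize_email(email: str) -> str:
--     if not email:
--         return email
--     chars = list(email)
--     i, j = 0, len(chars)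
--     while i < j and chars[i].isspace():
--         i += 1
--     while j > i and chars[j - 1].isspace():
--         j -= 1
--     out = []
--     for c in chars[i:j]:
--         lc = c.lower()
--         if lc not in '<>"\'&':
--             out.append(lc)
--     return ''.join(out)
-- ===== Notes on version B (the rewrite author's own statement) =====
-- stated objective: alternative
-- what changed: Replaces A's staged string passes (whole-string lower, strip, then five successive str.replace scans) with an explicit two-pointer trim over the character array followed by a single accumulator loop that lowercases each kept character and drops the dangerous ones.
import Mathlib
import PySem

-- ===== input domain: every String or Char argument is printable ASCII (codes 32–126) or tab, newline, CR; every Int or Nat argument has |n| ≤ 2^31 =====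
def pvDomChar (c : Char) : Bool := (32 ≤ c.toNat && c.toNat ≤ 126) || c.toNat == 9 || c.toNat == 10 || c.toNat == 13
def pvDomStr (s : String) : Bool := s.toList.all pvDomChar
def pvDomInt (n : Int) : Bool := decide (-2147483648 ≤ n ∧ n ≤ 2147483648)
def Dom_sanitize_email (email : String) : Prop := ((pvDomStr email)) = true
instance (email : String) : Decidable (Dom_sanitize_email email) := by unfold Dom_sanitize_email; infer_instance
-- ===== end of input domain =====

-- B replaces A's staged passes (lower, strip, five replace scans) with a two-pointer
-- index trim plus one accumulator loop lowercasing and filtering; objective: alternative.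

-- ===== PORT A =====
def sanitize_email (email : String) : String :=
  if email = "" then email
  else
    let e := PySem.Str.strip (PySem.Str.lower email)
    ['<', '>', '"', '\'', '&'].foldl (fun e c => PySem.Str.replace e (String.ofList [c]) "") e

-- ===== PORT B =====
-- while i < j and chars[i].isspace(): i += 1
def pvTrimL (cs : List Char) (j : Nat) (i : Nat) : Nat :=
  if h : i < j ∧ PySem.Chars.isspace (cs.getD i ' ') = true then pvTrimL cs j (i + 1)
  else i
termination_by j - i
decreasing_by omega

-- while j > i and chars[j-1].isspace(): j -= 1
def pvTrimR (cs : List Char) (i : Nat) (j : Nat) : Nat :=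
  if h : i < j ∧ PySem.Chars.isspace (cs.getD (j - 1) ' ') = true then pvTrimR cs i (j - 1)
  else j
termination_by j
decreasing_by omega

def sanitize_email_alt (email : String) : String :=
  if email = "" then email
  else
    let cs := email.toList
    let i := pvTrimL cs cs.length 0
    let j := pvTrimR cs i cs.length
    String.ofList (((cs.drop i).take (j - i)).foldl
      (fun out c =>
        let lc := PySem.Chars.lowerChar c
        if ['<', '>', '"', '\'', '&'].contains lc then out else out ++ [lc]) [])

-- ===== PRECONDITION & SPEC =====
def Spec_sanitize_email (email : String) (out : String) : Prop := out = sanitize_email_alt email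
instance (email : String) (out : String) : Decidable (Spec_sanitize_email email out) := by unfold Spec_sanitize_email; infer_instance

-- ===== CLAIM (what is proved, stated in full; the proofs are below) =====
def Claim_equal_sanitize_email : Prop := ∀ (email : String), Dom_sanitize_email email → Spec_sanitize_email email (sanitize_email email)

-- ===== LEMMAS AND PROOFS =====

-- A side: replace with a single-character pattern and empty replacement is a filter
theorem replace_go_single (c : Char) :
    ∀ (fuel : Nat) (l acc : List Char), l.length ≤ fuel →
      PySem.Chars.replace.go [c] [] fuel l acc = acc.reverse ++ l.filter (fun x => x ≠ c) := by
  intro fuel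
  induction fuel with
  | zero => intro l acc h; cases l with
    | nil => simp [PySem.Chars.replace.go]
    | cons a t => simp at h
  | succ n ih =>
    intro l acc h
    cases l with
    | nil => simp [PySem.Chars.replace.go]
    | cons a t =>
      simp only [PySem.Chars.replace.go]
      by_cases hc : a = c
      · subst hc
        have hp : List.isPrefixOf [a] (a :: t) = true := by simp [List.isPrefixOf]
        rw [if_pos hp]
        have hih := ih t acc (by simpa using Nat.le_of_succ_le_succ h)
        simp only [List.length_cons, List.length_nil, List.drop_succ_cons, List.drop_zero,
          List.reverse_nil, List.nil_append] at hih ⊢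
        rw [hih]
        simp
      · have hp : List.isPrefixOf [c] (a :: t) = false := by
          simp [List.isPrefixOf]; exact fun h' => absurd h'.symm hc
        rw [if_neg (by simp [hp])]
        rw [ih t (a :: acc) (by simpa using Nat.le_of_succ_le_succ h)]
        simp [hc]

theorem replace_single (s : List Char) (c : Char) :
    PySem.Chars.replace s [c] [] = s.filter (fun x => x ≠ c) := by
  rw [PySem.Chars.replace]
  simp only [List.isEmpty]
  simpa using replace_go_single c s.length s [] (le_refl _)

theorem toList_replace_char (s : String) (c : Char) :
    (PySem.Str.replace s (String.ofList [c]) "").toList = s.toList.filter (fun x => x ≠ c) := by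
  simp [PySem.Str.replace, replace_single]

theorem foldl_replace (ds : List Char) : ∀ (s : String),
    (ds.foldl (fun e c => PySem.Str.replace e (String.ofList [c]) "") s).toList
      = s.toList.filter (fun c => !(ds.contains c)) := by
  induction ds with
  | nil => intro s; simp
  | cons d ds ih =>
    intro s
    simp only [List.foldl_cons]
    rw [ih, toList_replace_char, List.filter_filter]
    apply List.filter_congr
    intro a _
    simp only [List.contains_cons]
    by_cases h1 : a = d <;> simp [h1]

-- lowering a character does not change whether it is whitespace
theorem isspace_lowerChar (c : Char) :
    PySem.Chars.isspace (PySem.Chars.lowerChar c) = PySem.Chars.isspace c := by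
  unfold PySem.Chars.lowerChar
  by_cases h : PySem.Chars.isupper c = true
  · rw [if_pos h]
    unfold PySem.Chars.isupper at h
    rw [Bool.and_eq_true, decide_eq_true_eq, decide_eq_true_eq] at h
    have hlo : 65 ≤ c.toNat := h.1
    have hhi : c.toNat ≤ 90 := h.2
    have hvalid : (c.toNat + 32).isValidChar := Or.inl (by omega)
    have hv : (Char.ofNat (c.toNat + 32)).toNat = c.toNat + 32 := by
      rw [Char.ofNat, dif_pos hvalid]; rfl
    unfold PySem.Chars.isspace
    rw [hv]
    apply Bool.eq_iff_iff.mpr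
    simp only [Bool.or_eq_true, Bool.and_eq_true, decide_eq_true_eq]
    omega
  · rw [if_neg h]

-- strip commutes with per-character lowering
theorem strip_lower (cs : List Char) :
    PySem.Chars.strip (PySem.Chars.lower cs) = (PySem.Chars.strip cs).map PySem.Chars.lowerChar := by
  have hfun : (PySem.Chars.isspace ∘ PySem.Chars.lowerChar) = PySem.Chars.isspace := by
    funext c; exact isspace_lowerChar c
  unfold PySem.Chars.strip PySem.Chars.lstrip PySem.Chars.rstrip PySem.Chars.lower
  simp only [List.dropWhile_map, hfun, ← List.map_reverse]

-- dropWhile as a drop of the takeWhile length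
theorem dropWhile_eq_drop (p : Char → Bool) (l : List Char) :
    List.dropWhile p l = l.drop (l.takeWhile p).length := by
  induction l with
  | nil => simp
  | cons a t ih => by_cases h : p a <;> simp [List.dropWhile, List.takeWhile, h, ih]

-- the left trim loop computes the length of the leading-whitespace prefix
theorem pvTrimL_eq (cs : List Char) :
    ∀ (n i : Nat), cs.length - i = n → i ≤ cs.length →
      pvTrimL cs cs.length i = i + ((cs.drop i).takeWhile PySem.Chars.isspace).length := by
  intro n
  induction n with
  | zero =>
    intro i hn hi
    have hieq : i = cs.length := by omega
    rw [pvTrimL, dif_neg (by omega), hieq]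
    simp
  | succ m ih =>
    intro i hn hi
    have hlt : i < cs.length := by omega
    have hdrop : cs.drop i = cs[i] :: cs.drop (i + 1) := List.drop_eq_getElem_cons hlt
    have hgetD : cs.getD i ' ' = cs[i] := List.getD_eq_getElem cs ' ' hlt
    rw [pvTrimL]
    by_cases hs : PySem.Chars.isspace cs[i] = true
    · rw [dif_pos ⟨hlt, by rw [hgetD]; exact hs⟩]
      rw [ih (i + 1) (by omega) (by omega)]
      rw [hdrop, List.takeWhile_cons, if_pos hs]
      simp; omega
    · rw [dif_neg (by rw [hgetD]; tauto)]
      rw [hdrop, List.takeWhile_cons, if_neg hs]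
      simp

-- the right trim loop computes the length of the trailing-whitespace suffix of the segment
theorem pvTrimR_eq (cs : List Char) :
    ∀ (n i j : Nat), j - i = n → i ≤ j → j ≤ cs.length →
      pvTrimR cs i j = j - (((cs.drop i).take (j - i)).reverse.takeWhile PySem.Chars.isspace).length := by
  intro n
  induction n with
  | zero =>
    intro i j hn hij hj
    rw [pvTrimR, dif_neg (by omega), hn]
    simp
  | succ m ih =>
    intro i j hn hij hj
    have hlt : i < j := by omega
    have hj1 : j - 1 < cs.length := by omega
    have hgetD : cs.getD (j - 1) ' ' = cs[j - 1] := List.getD_eq_getElem cs ' ' hj1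
    have hseg : ((cs.drop i).take (j - i)).reverse
        = cs[j - 1] :: ((cs.drop i).take (j - 1 - i)).reverse := by
      have h1 : j - i = (j - 1 - i) + 1 := by omega
      rw [h1, List.take_add_one]
      have h2 : (cs.drop i)[j - 1 - i]? = some cs[j - 1] := by
        rw [List.getElem?_drop]
        rw [List.getElem?_eq_getElem (by omega)]
        congr 1
        congr 1
        omega
      rw [h2]
      simp
    by_cases hs : PySem.Chars.isspace cs[j - 1] = true
    · rw [pvTrimR, dif_pos ⟨hlt, by rw [hgetD]; exact hs⟩]
      rw [ih i (j - 1) (by omega) (by omega) (by omega)]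
      rw [hseg, List.takeWhile_cons, if_pos hs]
      have hb : (((cs.drop i).take (j - 1 - i)).reverse.takeWhile PySem.Chars.isspace).length
          ≤ j - 1 - i := by
        have h1 := (List.takeWhile_sublist (l := ((cs.drop i).take (j - 1 - i)).reverse)
          PySem.Chars.isspace).length_le
        simp at h1
        omega
      simp only [List.length_cons]
      omega
    · rw [pvTrimR, dif_neg (by rw [hgetD]; tauto)]
      rw [hseg, List.takeWhile_cons, if_neg hs]
      simp

-- B's accumulator loop is a filter of the lowercased segment
theorem foldl_lower_filter (ds : List Char) :
    ∀ (l out : List Char),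
      l.foldl (fun out c =>
        let lc := PySem.Chars.lowerChar c
        if ds.contains lc then out else out ++ [lc]) out
      = out ++ (l.map PySem.Chars.lowerChar).filter (fun c => !(ds.contains c)) := by
  intro l
  induction l with
  | nil => intro out; simp
  | cons a t ih =>
    intro out
    simp only [List.foldl_cons, List.map_cons, List.filter_cons]
    by_cases h : PySem.Chars.lowerChar a ∈ ds
    · rw [if_pos (by simpa using h), ih]; simp [h]
    · rw [if_neg (by simpa using h), ih]; simp [h]

-- the two trims followed by the slice produce exactly strip
theorem trim_slice_eq_strip (cs : List Char) :
    (cs.drop (pvTrimL cs cs.length 0)).take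
        (pvTrimR cs (pvTrimL cs cs.length 0) cs.length - pvTrimL cs cs.length 0)
      = PySem.Chars.strip cs := by
  have htLle : (cs.takeWhile PySem.Chars.isspace).length ≤ cs.length :=
    (List.takeWhile_sublist _).length_le
  have hL : pvTrimL cs cs.length 0 = (cs.takeWhile PySem.Chars.isspace).length := by
    simpa using pvTrimL_eq cs (cs.length - 0) 0 rfl (by omega)
  have hdropL : cs.drop (cs.takeWhile PySem.Chars.isspace).length = PySem.Chars.lstrip cs := by
    rw [PySem.Chars.lstrip, dropWhile_eq_drop]
  have hlen : (PySem.Chars.lstrip cs).length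
      = cs.length - (cs.takeWhile PySem.Chars.isspace).length := by
    rw [← hdropL]; simp
  have htwRle : ((PySem.Chars.lstrip cs).reverse.takeWhile PySem.Chars.isspace).length
      ≤ (PySem.Chars.lstrip cs).length := by
    have h1 := (List.takeWhile_sublist (l := (PySem.Chars.lstrip cs).reverse)
      PySem.Chars.isspace).length_le
    simpa using h1
  have hseg : (cs.drop (cs.takeWhile PySem.Chars.isspace).length).take
      (cs.length - (cs.takeWhile PySem.Chars.isspace).length) = PySem.Chars.lstrip cs := by
    rw [hdropL]; exact List.take_of_length_le (le_of_eq hlen)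
  have hR : pvTrimR cs (cs.takeWhile PySem.Chars.isspace).length cs.length
      = cs.length - ((PySem.Chars.lstrip cs).reverse.takeWhile PySem.Chars.isspace).length := by
    rw [pvTrimR_eq cs (cs.length - (cs.takeWhile PySem.Chars.isspace).length) _ cs.length rfl
      htLle (le_refl _), hseg]
  rw [hL, hR]
  have harith : cs.length
        - ((PySem.Chars.lstrip cs).reverse.takeWhile PySem.Chars.isspace).length
        - (cs.takeWhile PySem.Chars.isspace).length
      = (PySem.Chars.lstrip cs).length
        - ((PySem.Chars.lstrip cs).reverse.takeWhile PySem.Chars.isspace).length := by omega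
  rw [harith, hdropL, PySem.Chars.strip, PySem.Chars.rstrip, dropWhile_eq_drop,
    List.drop_reverse, List.reverse_reverse]

-- ===== VERDICT (by name: the statement is the Claim_ definition above) =====
theorem sanitize_email_spec : Claim_equal_sanitize_email := by
  intro email _
  unfold Spec_sanitize_email sanitize_email sanitize_email_alt
  by_cases h : email = ""
  · simp [h]
  · rw [if_neg h, if_neg h]
    apply String.toList_inj.mp
    rw [foldl_replace, String.toList_ofList]
    rw [foldl_lower_filter]
    rw [trim_slice_eq_strip]
    have : (PySem.Str.strip (PySem.Str.lower email)).toList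
        = (PySem.Chars.strip email.toList).map PySem.Chars.lowerChar := by
      simp [strip_lower]
    rw [this]
    simp
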